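-- pv_equiv track=rewrite | github.com/lambdagirl/leetcode-practice | interleave_two_arrays.py | interleaveArrays
-- ===== SOURCE A (Python) =====
-- def interleaveArrays(lists):
--     res = []
--     i = 0
--     done = False
--     while not done:
--         done = True
--         for l in lists:
--             if i < len(l):
--                 res.append(l[i])
--                 done = False
--         i +=1
--     return res
-- ===== SOURCE B (Python) =====
-- def interleaveArrays(lists):
--     live = [l for l in lists if l]
--     if not live:
--         return []
--     return [l[0] for l in live] + interleaveArrays([l[1:] for l in live])
-- ===== Notes on version B (the rewrite author's own statement) =====
-- stated objective: alternative
-- what changed: A's index-sweeping while loop with a 'done' sentinel is replaced by a recursion that peels off the current column (heads of the surviving lists) and recurses on the sliced tails, discarding exhausted lists so no index bookkeeping remains.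
import Mathlib
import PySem

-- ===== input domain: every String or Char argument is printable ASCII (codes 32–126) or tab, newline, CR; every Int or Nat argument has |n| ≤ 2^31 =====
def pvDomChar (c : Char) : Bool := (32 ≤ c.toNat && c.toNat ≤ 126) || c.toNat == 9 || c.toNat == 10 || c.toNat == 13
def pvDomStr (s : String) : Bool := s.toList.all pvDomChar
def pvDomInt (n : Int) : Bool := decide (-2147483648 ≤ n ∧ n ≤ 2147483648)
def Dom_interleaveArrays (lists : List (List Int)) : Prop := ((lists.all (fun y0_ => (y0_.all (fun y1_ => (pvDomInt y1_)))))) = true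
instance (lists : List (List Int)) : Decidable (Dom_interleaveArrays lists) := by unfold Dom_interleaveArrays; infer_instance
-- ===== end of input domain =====

-- B replaces A's index-sweeping while loop (with its 'done' sentinel) by a recursion that emits the
-- heads of the surviving lists and recurses on their sliced tails; objective: alternative, same cost class.

-- ===== PORT A =====
-- one pass of A's while-loop body: the inner 'for l in lists' with state (res, done)
def interleaveArraysPass (lists : List (List Int)) (res : List Int) (i : Nat) : List Int × Bool :=
  lists.foldl (fun q l => if i < l.length then (q.1 ++ [l.getD i 0], false) else q) (res, true)

-- what one pass computes (cited by the port's decreasing_by and by the proofs below)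
theorem pvFold_spec (i : Nat) (lists : List (List Int)) (res : List Int) (b : Bool) :
    lists.foldl (fun q l => if i < l.length then (q.1 ++ [l.getD i 0], false) else q) (res, b)
      = (res ++ lists.filterMap (fun l => if i < l.length then some (l.getD i 0) else none),
         b && lists.all (fun l => l.length ≤ i)) := by
  induction lists generalizing res b with
  | nil => simp
  | cons l t ih =>
    simp only [List.foldl_cons, List.filterMap_cons, List.all_cons]
    by_cases h : i < l.length
    · rw [if_pos h, if_pos h, ih]
      simp [Nat.not_le.mpr h]
    · rw [if_neg h, if_neg h, ih]
      simp [Nat.not_lt.mp h]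

theorem pvFoldMax_le (lists : List (List Int)) (a i : Nat) :
    lists.foldl (fun a l => max a l.length) a ≤ i ↔ a ≤ i ∧ ∀ l ∈ lists, l.length ≤ i := by
  induction lists generalizing a with
  | nil => simp
  | cons l t ih => simp [ih]; tauto

theorem pvPass_not_done (lists : List (List Int)) (res : List Int) (i : Nat)
    (h : ¬(interleaveArraysPass lists res i).2 = true) :
    i < lists.foldl (fun a l => max a l.length) 0 := by
  rw [interleaveArraysPass, pvFold_spec] at h
  simp at h
  obtain ⟨l, hl, hlen⟩ := h
  by_contra hc
  have := ((pvFoldMax_le lists 0 i).mp (Nat.not_lt.mp hc)).2 l hl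
  omega

-- the while loop of A: state (res, i); repeat a pass until it appends nothing
def interleaveArraysLoop (lists : List (List Int)) (res : List Int) (i : Nat) : List Int :=
  let p := interleaveArraysPass lists res i
  if h : p.2 = true then p.1
  else interleaveArraysLoop lists p.1 (i + 1)
termination_by lists.foldl (fun a l => max a l.length) 0 - i
decreasing_by have := pvPass_not_done lists res i h; omega

def interleaveArrays (lists : List (List Int)) : List Int :=
  interleaveArraysLoop lists [] 0

-- ===== PORT B =====
theorem pvSum_filter_le (lists : List (List Int)) :
    ((lists.filter (fun l => !l.isEmpty)).map List.length).sum ≤ (lists.map List.length).sum := by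
  induction lists with
  | nil => simp
  | cons l t ih =>
    by_cases hl : (!l.isEmpty) = true
    · rw [List.filter_cons, if_pos hl]; simp only [List.map_cons, List.sum_cons]; omega
    · rw [List.filter_cons, if_neg hl]; simp only [List.map_cons, List.sum_cons]; omega

theorem pvSum_drop (xs : List (List Int)) (hxs : ∀ l ∈ xs, l ≠ []) :
    ((xs.map (fun l => l.drop 1)).map List.length).sum + xs.length = (xs.map List.length).sum := by
  induction xs with
  | nil => simp
  | cons l t ih =>
    have hl : l.length ≥ 1 := by
      have := hxs l (by simp)
      cases l with
      | nil => simp at this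
      | cons a b => simp
    have := ih (fun l hl => hxs l (by simp [hl]))
    simp only [List.map_cons, List.sum_cons, List.length_cons, List.length_drop]
    omega

-- total elements remaining strictly decrease when some list survives (cited by decreasing_by)
theorem pvSum_lt (lists : List (List Int))
    (h : lists.filter (fun l => !l.isEmpty) ≠ []) :
    ((((lists.filter (fun l => !l.isEmpty)).map (fun l => l.drop 1))).map List.length).sum
      < (lists.map List.length).sum := by
  have hsub := pvSum_filter_le lists
  have hne : ∀ l ∈ lists.filter (fun l => !l.isEmpty), l ≠ [] := by
    intro l hl
    have := List.of_mem_filter hl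
    simpa using this
  have hd := pvSum_drop _ hne
  have hlen : (lists.filter (fun l => !l.isEmpty)).length ≥ 1 := by
    cases hf : lists.filter (fun l => !l.isEmpty) with
    | nil => exact absurd hf h
    | cons a b => simp
  omega

-- 'live' from Source B is inlined as the filter; l[0] on a nonempty list = headD;
-- l[1:] = List.drop 1 (exact for a nonnegative slice start)
def interleaveArrays_alt (lists : List (List Int)) : List Int :=
  if h : lists.filter (fun l => !l.isEmpty) = [] then []
  else (lists.filter (fun l => !l.isEmpty)).map (fun l => l.headD 0)
       ++ interleaveArrays_alt ((lists.filter (fun l => !l.isEmpty)).map (fun l => l.drop 1))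
termination_by (lists.map List.length).sum
decreasing_by
  simp only [List.map_subtype, List.unattach_filter, List.unattach_attach]
  exact pvSum_lt lists h

-- ===== PRECONDITION & SPEC =====
def Spec_interleaveArrays (lists : List (List Int)) (out : List Int) : Prop := out = interleaveArrays_alt lists
instance (lists : List (List Int)) (out : List Int) : Decidable (Spec_interleaveArrays lists out) := by unfold Spec_interleaveArrays; infer_instance

-- ===== CLAIM =====
def Claim_equal_interleaveArrays : Prop := ∀ (lists : List (List Int)), Dom_interleaveArrays lists → Spec_interleaveArrays lists (interleaveArrays lists)

-- ===== LEMMAS AND PROOFS =====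

-- column i of the interleaving (what one pass of A appends; B emits it as heads of the survivors)
def pvCol (lists : List (List Int)) (i : Nat) : List Int :=
  lists.filterMap (fun l => if i < l.length then some (l.getD i 0) else none)

theorem pvPass_spec (lists : List (List Int)) (res : List Int) (i : Nat) :
    interleaveArraysPass lists res i
      = (res ++ pvCol lists i, lists.all (fun l => l.length ≤ i)) := by
  rw [interleaveArraysPass, pvFold_spec, Bool.true_and, pvCol]

theorem pvCol_nil (lists : List (List Int)) (i : Nat)
    (h : ∀ l ∈ lists, l.length ≤ i) : pvCol lists i = [] := by
  simp only [pvCol, List.filterMap_eq_nil_iff]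
  intro l hl
  simp [Nat.not_lt.mpr (h l hl)]

theorem pvLoop_eq (lists : List (List Int)) (k : Nat) :
    ∀ (i : Nat) (res : List Int), lists.foldl (fun a l => max a l.length) 0 ≤ i + k →
      interleaveArraysLoop lists res i = res ++ (List.range' i k).flatMap (pvCol lists) := by
  induction k with
  | zero =>
    intro i res h
    have hall := ((pvFoldMax_le lists 0 i).mp (by omega)).2
    have hd : (lists.all (fun l => l.length ≤ i)) = true := by
      simp only [List.all_eq_true, decide_eq_true_eq]; exact hall
    rw [interleaveArraysLoop]
    simp [pvPass_spec, hd, pvCol_nil lists i hall]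
  | succ k ih =>
    intro i res h
    rw [interleaveArraysLoop]
    simp only [pvPass_spec]
    by_cases hd : (lists.all (fun l => l.length ≤ i)) = true
    · have hall : ∀ l ∈ lists, l.length ≤ i := by simpa using hd
      have hflat : (List.range' i (k + 1)).flatMap (pvCol lists) = [] := by
        rw [List.flatMap_eq_nil_iff]
        intro j hj
        have : i ≤ j := (List.mem_range'_1.mp hj).1
        exact pvCol_nil lists j (fun l hl => le_trans (hall l hl) this)
      simp [hd, hflat, pvCol_nil lists i hall]
    · rw [dif_neg (by simpa using hd)]
      rw [ih (i + 1) (res ++ pvCol lists i) (by omega)]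
      simp [List.range'_succ]

-- column 0 = the heads of the surviving lists
theorem pvCol_zero (lists : List (List Int)) :
    pvCol lists 0 = (lists.filter (fun l => !l.isEmpty)).map (fun l => l.headD 0) := by
  induction lists with
  | nil => rfl
  | cons l t ih =>
    cases l with
    | nil => simpa [pvCol, List.filter_cons] using ih
    | cons a b => simpa [pvCol, List.filter_cons] using ih

-- a column of the sliced survivors is the next column of the original lists
theorem pvCol_step (lists : List (List Int)) (i : Nat) :
    pvCol ((lists.filter (fun l => !l.isEmpty)).map (fun l => l.drop 1)) i
      = pvCol lists (i + 1) := by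
  induction lists with
  | nil => rfl
  | cons l t ih =>
    cases l with
    | nil => simpa [pvCol, List.filter_cons] using ih
    | cons a b =>
      simp only [List.filter_cons, List.isEmpty_cons, Bool.not_false, if_pos, List.map_cons,
        pvCol, List.filterMap_cons] at *
      have hlen : (((a :: b).drop 1).length) = b.length := by simp
      by_cases hi : i < b.length
      · rw [if_pos (by simpa using hi), if_pos (by simpa using hi)]
        have : ((a :: b).drop 1).getD i 0 = (a :: b).getD (i + 1) 0 := by simp [List.getD]
        rw [this, ih]
      · rw [if_neg (by simpa using hi), if_neg (by simpa using hi)]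
        exact ih

-- the max-length accumulator ignores empty lists …
theorem pvMax_filter (lists : List (List Int)) (a : Nat) :
    (lists.filter (fun l => !l.isEmpty)).foldl (fun a l => max a l.length) a
      = lists.foldl (fun a l => max a l.length) a := by
  induction lists generalizing a with
  | nil => rfl
  | cons l t ih =>
    cases l with
    | nil => simpa [List.filter_cons] using ih a
    | cons x b => simpa [List.filter_cons] using ih (max a (x :: b).length)

-- … and drops by exactly one on the sliced survivors
theorem pvMax_drop (xs : List (List Int)) (hxs : ∀ l ∈ xs, l ≠ []) (a : Nat) :
    (xs.map (fun l => l.drop 1)).foldl (fun a l => max a l.length) a + 1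
      = xs.foldl (fun a l => max a l.length) (a + 1) := by
  induction xs generalizing a with
  | nil => rfl
  | cons l t ih =>
    have hl : 1 ≤ l.length := by
      have := hxs l (by simp)
      cases l with
      | nil => simp at this
      | cons x b => simp
    have := ih (fun l hl => hxs l (by simp [hl])) (max a (l.length - 1))
    simp only [List.map_cons, List.foldl_cons, List.length_drop] at *
    rw [this]
    congr 1
    omega

-- foldl max with a nonzero accumulator
theorem pvMax_init (lists : List (List Int)) (a : Nat) :
    lists.foldl (fun a l => max a l.length) a
      = max a (lists.foldl (fun a l => max a l.length) 0) := by
  induction lists generalizing a with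
  | nil => simp
  | cons l t ih =>
    simp only [List.foldl_cons]
    rw [ih (max a l.length), ih (max 0 l.length)]
    omega

theorem pvMax_zero (lists : List (List Int))
    (h : lists.filter (fun l => !l.isEmpty) = []) :
    lists.foldl (fun a l => max a l.length) 0 = 0 := by
  rw [Nat.le_zero.mp ((pvFoldMax_le lists 0 0).mpr ⟨le_refl 0, ?_⟩)]
  intro l hl
  by_contra hc
  have hne : l ≠ [] := by
    cases l with
    | nil => simp at hc
    | cons a b => simp
  have : l ∈ lists.filter (fun l => !l.isEmpty) :=
    List.mem_filter.mpr ⟨hl, by simpa using hne⟩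
  rw [h] at this
  simp at this

-- B computes the columns 0..max-1 of the input
theorem pvAlt_eq (lists : List (List Int)) :
    interleaveArrays_alt lists
      = (List.range (lists.foldl (fun a l => max a l.length) 0)).flatMap (pvCol lists) := by
  induction lists using interleaveArrays_alt.induct with
  | case1 lists h =>
    rw [interleaveArrays_alt, dif_pos h, pvMax_zero lists h]
    simp
  | case2 lists h ih =>
    simp only [List.map_subtype, List.unattach_filter, List.unattach_attach] at ih
    have hne : ∀ l ∈ lists.filter (fun l => !l.isEmpty), l ≠ [] := by
      intro l hl
      have := List.of_mem_filter hl
      simpa using this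
    have hM1 : 1 ≤ lists.foldl (fun a l => max a l.length) 0 := by
      by_contra hc
      have hall := ((pvFoldMax_le lists 0 0).mp (by omega)).2
      apply h
      rw [List.filter_eq_nil_iff]
      intro l hl
      have := hall l hl
      cases l with
      | nil => simp
      | cons x b => simp at this
    have hM : ((lists.filter (fun l => !l.isEmpty)).map (fun l => l.drop 1)).foldl
          (fun a l => max a l.length) 0 + 1
        = lists.foldl (fun a l => max a l.length) 0 := by
      rw [pvMax_drop _ hne 0, pvMax_filter lists (0 + 1), pvMax_init lists (0 + 1)]
      omega
    rw [interleaveArrays_alt, dif_neg h, ih, ← hM, ← pvCol_zero lists]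
    rw [List.range_succ_eq_map]
    simp only [List.flatMap_cons, List.flatMap_map]
    congr 1
    refine List.flatMap_congr ?_
    intro i _
    exact pvCol_step lists i

-- ===== VERDICT (by name: the statement is the Claim_ definition above) =====
theorem interleaveArrays_spec : Claim_equal_interleaveArrays := by
  intro lists _
  unfold Spec_interleaveArrays interleaveArrays
  rw [pvLoop_eq lists (lists.foldl (fun a l => max a l.length) 0) 0 [] (by omega), pvAlt_eq]
  simp [List.range_eq_range']
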